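-- pv_equiv track=rewrite | github.com/EngMohamedsadeq/pdf2img | scripts/convert.py | _pick_best_number
-- ===== SOURCE A (Python) =====
-- def _pick_best_number(cands):
--     if not cands:
--         return None
--     filtered = []
--     for s in cands:
--         s = (s or "").strip()
--         if not s:
--             continue
--         n = len(s.replace("#", ""))
--         if 5 <= n <= 12:
--             filtered.append(s)
--     if not filtered:
--         return None
--     def score(s):
--         n = len(s.replace("#", ""))
--         return (-(abs(n - 7)), -n)
--     filtered.sort(key=score, reverse=True)
--     return filtered[0]
-- ===== SOURCE B (Python) =====
-- def _pick_best_number(cands):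
--     best = None
--     best_key = None
--     for s in cands:
--         s = (s or "").strip()
--         if not s:
--             continue
--         n = len(s.replace("#", ""))
--         if not (5 <= n <= 12):
--             continue
--         key = (abs(n - 7), n)
--         if best is None or key < best_key:
--             best = s
--             best_key = key
--     return best
-- ===== Notes on version B (the rewrite author's own statement) =====
-- stated objective: simpler
-- what changed: Replaces the filter-then-stable-sort-then-take-first pipeline by a single pass that keeps a running best candidate and its key (abs(n-7), n), updating only on strict improvement to preserve first-wins ties.
import Mathlib
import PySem

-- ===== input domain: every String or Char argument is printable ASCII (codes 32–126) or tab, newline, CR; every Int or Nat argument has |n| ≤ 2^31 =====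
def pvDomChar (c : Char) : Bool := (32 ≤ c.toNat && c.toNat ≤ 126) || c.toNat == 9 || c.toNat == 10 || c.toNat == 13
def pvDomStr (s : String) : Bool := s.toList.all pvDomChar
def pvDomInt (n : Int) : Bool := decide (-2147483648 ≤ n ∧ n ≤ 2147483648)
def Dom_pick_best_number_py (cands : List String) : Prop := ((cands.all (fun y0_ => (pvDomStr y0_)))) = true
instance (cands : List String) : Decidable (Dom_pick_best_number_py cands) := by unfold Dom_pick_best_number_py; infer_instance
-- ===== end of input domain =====

-- B replaces A's filter-then-stable-sort-then-take-first pipeline by a single pass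
-- keeping a running best candidate and its key, updated only on strict improvement.


-- ===== PORT A =====
-- n = len(s.replace("#", ""))
def pvN (s : String) : Int := PySem.Str.len (PySem.Str.replace s "#" "")

def pick_best_number_py (cands : List String) : Option String :=
  if cands = [] then none
  else
    -- the filter loop: s = (s or "").strip(); skip empties; keep 5 <= n <= 12
    let filtered := cands.foldl (fun acc s =>
      let s := PySem.Str.strip (if s = "" then "" else s)   -- (s or "").strip()
      if s = "" then acc
      else
        let n := pvN s
        if 5 ≤ n ∧ n ≤ 12 then acc ++ [s] else acc) []
    if filtered = [] then none
    else
      -- filtered.sort(key=lambda s: (-(abs(n-7)), -n), reverse=True); return filtered[0]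
      (PySem.List.sorted2 filtered (fun s => -(|pvN s - 7|)) (fun s => -(pvN s)) true).head?

-- ===== PORT B =====
-- one step of B's loop: strip, skip empties and out-of-range n, replace best on strict key improvement
def pvBStep (best : Option (String × (Int × Int))) (s : String) : Option (String × (Int × Int)) :=
  let s := PySem.Str.strip s
  if s = "" then best
  else
    let n := pvN s
    if ¬ (5 ≤ n ∧ n ≤ 12) then best
    else
      let key : Int × Int := (|n - 7|, n)
      match best with
      | none => some (s, key)
      | some (b, bk) =>
          -- Python tuple comparison key < best_key, spelled out lexicographically
          if key.1 < bk.1 ∨ (key.1 = bk.1 ∧ key.2 < bk.2) then some (s, key) else some (b, bk)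

def pick_best_number_py_alt (cands : List String) : Option String :=
  (cands.foldl pvBStep none).map Prod.fst

-- ===== PRECONDITION & SPEC =====
def Spec_pick_best_number_py (cands : List String) (out : Option String) : Prop := out = pick_best_number_py_alt cands
instance (cands : List String) (out : Option String) : Decidable (Spec_pick_best_number_py cands out) := by unfold Spec_pick_best_number_py; infer_instance

-- ===== CLAIM (what is proved, stated in full; the proofs are below) =====
def Claim_equal_pick_best_number_py : Prop := ∀ (cands : List String), Dom_pick_best_number_py cands → Spec_pick_best_number_py cands (pick_best_number_py cands)

-- ===== LEMMAS AND PROOFS =====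

-- the candidate s survives A's filter iff pvH s = some (stripped s)
def pvH (s : String) : Option String :=
  let s := PySem.Str.strip s
  if s = "" then none
  else if 5 ≤ pvN s ∧ pvN s ≤ 12 then some s else none

-- A's one comparison step when scanning for the head of the reverse-sorted list
def pvAStep (acc : Option String) (x : String) : Option String :=
  match acc with
  | none => some x
  | some b =>
      if (decide (-(|pvN b - 7|) < -(|pvN x - 7|)) ||
          (!decide (-(|pvN x - 7|) < -(|pvN b - 7|)) && decide (-(pvN b) < -(pvN x)))) then some x
      else some b

theorem step_bool (d1 d2 n1 n2 : Int) :
    (decide (-d2 < -d1) || (!decide (-d1 < -d2) && decide (-n2 < -n1))) =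
      decide (d1 < d2 ∨ (d1 = d2 ∧ n1 < n2)) := by
  simp only [← decide_not, ← Bool.decide_and, ← Bool.decide_or, decide_eq_decide]
  omega

theorem head?_insertBy (before : String → String → Bool) (x : String) (acc : List String) :
    (PySem.List.insertBy before x acc).head? =
      match acc.head? with
      | none => some x
      | some b => if before x b then some x else some b := by
  cases acc with
  | nil => rfl
  | cons y ys =>
      rw [show PySem.List.insertBy before x (y :: ys) =
        if before x y then x :: y :: ys else y :: PySem.List.insertBy before x ys from rfl]
      split <;> simp_all

theorem head?_foldl_insertBy (before : String → String → Bool) (xs : List String)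
    (acc : List String) :
    (xs.foldl (fun acc x => PySem.List.insertBy before x acc) acc).head? =
      xs.foldl (fun h x =>
        match h with
        | none => some x
        | some b => if before x b then some x else some b) acc.head? := by
  induction xs generalizing acc with
  | nil => rfl
  | cons y ys ih => simp only [List.foldl_cons, ih, head?_insertBy]

theorem body_eq (acc : List String) (s : String) :
    (let t := PySem.Str.strip (if s = "" then "" else s)
     if t = "" then acc
     else
       let n := pvN t
       if 5 ≤ n ∧ n ≤ 12 then acc ++ [t] else acc) = acc ++ (pvH s).toList := by
  have hstr : PySem.Str.strip (if s = "" then "" else s) = PySem.Str.strip s := by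
    split <;> simp_all
  simp only [pvH, hstr]
  split_ifs <;> simp

theorem filtered_eq (cands : List String) (acc : List String) :
    cands.foldl (fun acc s =>
      let s := PySem.Str.strip (if s = "" then "" else s)
      if s = "" then acc
      else
        let n := pvN s
        if 5 ≤ n ∧ n ≤ 12 then acc ++ [s] else acc) acc = acc ++ cands.filterMap pvH := by
  induction cands generalizing acc with
  | nil => simp
  | cons s ss ih =>
      simp only [List.foldl_cons, List.filterMap_cons]
      rw [body_eq, ih]
      cases pvH s <;> simp

-- the fused scan: A's pick over the filtered list equals B's fold, under the invariant
-- that B's accumulator stores exactly A's current best together with its true key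
theorem fused (cands : List String) (oa : Option String) (ob : Option (String × (Int × Int)))
    (hfst : oa = ob.map Prod.fst)
    (hkey : ∀ x k, ob = some (x, k) → k = (|pvN x - 7|, pvN x)) :
    (cands.filterMap pvH).foldl pvAStep oa = (cands.foldl pvBStep ob).map Prod.fst := by
  induction cands generalizing oa ob with
  | nil => simpa using hfst
  | cons s ss ih =>
      simp only [List.filterMap_cons, List.foldl_cons]
      by_cases h1 : PySem.Str.strip s = ""
      · have hb : pvBStep ob s = ob := by simp [pvBStep, h1]
        simp only [pvH, h1, if_true, hb]
        exact ih oa ob hfst hkey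
      · by_cases h2 : 5 ≤ pvN (PySem.Str.strip s) ∧ pvN (PySem.Str.strip s) ≤ 12
        · have hh : pvH s = some (PySem.Str.strip s) := by simp [pvH, h1, h2]
          rw [hh]
          simp only [List.foldl_cons]
          cases ob with
          | none =>
              cases hfst
              have hb : pvBStep none s =
                  some (PySem.Str.strip s,
                    (|pvN (PySem.Str.strip s) - 7|, pvN (PySem.Str.strip s))) := by
                simp [pvBStep, h1, h2]
              rw [hb]
              exact ih _ _ rfl (by rintro x k ⟨⟩; rfl)
          | some p =>
              obtain ⟨b, bk⟩ := p
              cases hfst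
              have hbk : bk = (|pvN b - 7|, pvN b) := hkey b bk rfl
              subst hbk
              simp only [Option.map_some]
              have ha : pvAStep (some b) (PySem.Str.strip s) =
                  if |pvN (PySem.Str.strip s) - 7| < |pvN b - 7| ∨
                     (|pvN (PySem.Str.strip s) - 7| = |pvN b - 7| ∧
                       pvN (PySem.Str.strip s) < pvN b)
                  then some (PySem.Str.strip s) else some b := by
                simp only [pvAStep, step_bool, decide_eq_true_eq]
              have hb : pvBStep (some (b, (|pvN b - 7|, pvN b))) s =
                  if |pvN (PySem.Str.strip s) - 7| < |pvN b - 7| ∨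
                     (|pvN (PySem.Str.strip s) - 7| = |pvN b - 7| ∧
                       pvN (PySem.Str.strip s) < pvN b)
                  then some (PySem.Str.strip s,
                    (|pvN (PySem.Str.strip s) - 7|, pvN (PySem.Str.strip s)))
                  else some (b, (|pvN b - 7|, pvN b)) := by
                simp [pvBStep, h1, h2]
              rw [ha, hb]
              by_cases hc : |pvN (PySem.Str.strip s) - 7| < |pvN b - 7| ∨
                  (|pvN (PySem.Str.strip s) - 7| = |pvN b - 7| ∧
                    pvN (PySem.Str.strip s) < pvN b) <;>
                simp only [hc, if_true, if_false] <;>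
                exact ih _ _ rfl (by rintro x k ⟨⟩; rfl)
        · have hh : pvH s = none := by simp [pvH, h1, h2]
          have hb : pvBStep ob s = ob := by simp [pvBStep, h1, h2]
          rw [hh, hb]
          exact ih oa ob hfst hkey

-- ===== VERDICT (by name: the statement is the Claim_ definition above) =====
theorem pick_best_number_py_spec : Claim_equal_pick_best_number_py := by
  intro cands _
  show pick_best_number_py cands = pick_best_number_py_alt cands
  unfold pick_best_number_py pick_best_number_py_alt
  by_cases hc : cands = []
  · subst hc; simp
  · simp only [hc, if_false]
    rw [filtered_eq cands []]
    simp only [List.nil_append]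
    have hsorted : (PySem.List.sorted2 (cands.filterMap pvH)
        (fun s => -(|pvN s - 7|)) (fun s => -(pvN s)) true).head? =
        (cands.filterMap pvH).foldl pvAStep none := by
      show ((cands.filterMap pvH).foldl
        (fun acc x => PySem.List.insertBy _ x acc) []).head? = _
      rw [head?_foldl_insertBy]
      rfl
    have hmain := fused cands none none rfl (by rintro x k ⟨⟩)
    by_cases hf : cands.filterMap pvH = []
    · simp only [hf, if_true]
      rw [hf] at hmain
      simpa using hmain
    · simp only [hf, if_false]
      rw [hsorted]
      exact hmain
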